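-- pv_equiv track=rewrite | github.com/Xoadra/AdventOfCode2020 | Day 7/main.py | colors_containing
-- ===== SOURCE A (Python) =====
-- from queue import Queue
--
-- def colors_containing(target, colors):
--     queue, visited = Queue(), set()
--     for color, edges in colors.items():
--         if target in edges:
--             queue.put(color)
--     while not queue.empty():
--         size = queue.qsize()
--         for step in range(size):
--             color = queue.get()
--             visited.add(color)
--             for pigment, edges in colors.items():
--                 if pigment != target and color in edges:
--                     queue.put(pigment)
--     return len(visited)
-- ===== SOURCE B (Python) =====
-- def colors_containing(target, colors):
--     # Reverse adjacency built in one pass, then a stack DFS with a visited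
--     # guard, instead of A's level-by-level rescans of the whole dict.
--     rev = {}
--     seeds = []
--     for color, edges in colors.items():
--         if target in edges:
--             seeds.append(color)
--         if color != target:
--             for e in edges:
--                 rev.setdefault(e, []).append(color)
--     visited = set(seeds)
--     stack = list(seeds)
--     while stack:
--         c = stack.pop()
--         for p in rev.get(c, []):
--             if p not in visited:
--                 visited.add(p)
--                 stack.append(p)
--     return len(visited)
-- ===== Notes on version B (the rewrite author's own statement) =====
-- stated objective: alternative
-- what changed: A re-scans the whole dict for every dequeued color and re-enqueues without a visited guard (looping forever on reachable cycles); B builds a reverse adjacency map and the seed list in one pass and runs a stack DFS with a visited guard. Pre_ excludes exactly the inputs where A diverges (a containment cycle reachable from the colors that directly contain the target); A returns on every input inside Pre_.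
import Mathlib
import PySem

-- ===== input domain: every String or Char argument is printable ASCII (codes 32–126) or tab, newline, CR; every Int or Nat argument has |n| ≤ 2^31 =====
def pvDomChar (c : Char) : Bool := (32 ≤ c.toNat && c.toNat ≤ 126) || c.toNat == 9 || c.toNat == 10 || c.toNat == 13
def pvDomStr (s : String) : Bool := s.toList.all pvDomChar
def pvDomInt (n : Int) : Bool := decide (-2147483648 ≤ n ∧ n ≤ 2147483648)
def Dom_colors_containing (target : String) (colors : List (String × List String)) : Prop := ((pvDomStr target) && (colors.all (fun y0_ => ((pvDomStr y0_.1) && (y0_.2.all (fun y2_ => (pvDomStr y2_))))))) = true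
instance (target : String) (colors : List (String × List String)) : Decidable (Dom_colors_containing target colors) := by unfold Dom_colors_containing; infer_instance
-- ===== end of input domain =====

-- B replaces A's repeated full scans of the dict (which has no visited guard) by one
-- reverse-adjacency pass plus a stack DFS with a visited guard (alternative algorithm).

-- ===== PORT A =====
-- the Python callee receives `colors` as a dict: PySem.Dict.ofList mirrors dict construction
-- (a later duplicate key overwrites in place); both ports read the same items list.
def pvItems (colors : List (String × List String)) : List (String × List String) :=
  (PySem.Dict.ofList colors).items

-- A's inner for-loop over colors.items(): pigments p ≠ target with the dequeued color in p's edges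
def pvNexts (its : List (String × List String)) (target c : String) : List String :=
  (its.filter (fun kv => kv.1 != target && kv.2.contains c)).map (fun kv => kv.1)

-- one outer while-iteration of A: dequeue the current `size` colors in order,
-- add each to `visited`, append each one's matching pigments to the queue
def pvLevelA (its : List (String × List String)) (target : String)
    (q : List String) (vis : List String) : List String × List String :=
  q.foldl (fun st c => (PySem.Set.add st.1 c, st.2 ++ pvNexts its target c)) (vis, ([] : List String))

-- A's while-loop. Python has no fuel; fuel = |items| + 1 provably suffices on every
-- input admitted by Pre_ (proved below), which is exactly the claim's scope.
def pvLoopA (its : List (String × List String)) (target : String) :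
    Nat → List String → List String → List String
  | 0, _, vis => vis
  | fuel+1, q, vis =>
    if q.isEmpty then vis
    else
      let st := pvLevelA its target q vis
      pvLoopA its target fuel st.2 st.1

def colors_containing (target : String) (colors : List (String × List String)) : Int :=
  let its := pvItems colors
  let seeds := (its.filter (fun kv => kv.2.contains target)).map (fun kv => kv.1)
  ((pvLoopA its target (its.length + 1) seeds []).length : Int)

-- ===== PORT B =====
-- B's single pass over colors.items(): seeds (colors directly containing target) and the
-- reverse adjacency rev (rev[e] = colors other than target whose edge list contains e)
def pvBStep (target : String) (st : PySem.Dict String (List String) × List String)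
    (kv : String × List String) : PySem.Dict String (List String) × List String :=
  (if kv.1 != target then
      kv.2.foldl (fun d e => d.modify e [] (fun l => l ++ [kv.1])) st.1
    else st.1,
   if kv.2.contains target then st.2 ++ [kv.1] else st.2)

def pvBuild (target : String) (its : List (String × List String)) :
    PySem.Dict String (List String) × List String :=
  its.foldl (pvBStep target) (PySem.Dict.empty, ([] : List String))

-- B's while-loop over the stack (list head = Python's end-of-list top, so pops/pushes mirror
-- list.pop()/append exactly). Python has no fuel; fuel = |seeds| + |items| + 1 provably never
-- runs out (each iteration shrinks stack + unvisited keys, proved below).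
def pvDfs (rev : PySem.Dict String (List String)) :
    Nat → List String → List String → List String
  | 0, _, vis => vis
  | _+1, [], vis => vis
  | fuel+1, c :: stack, vis =>
    let st := (rev.getD c []).foldl
        (fun st p => if PySem.Set.contains st.2 p then st else (p :: st.1, PySem.Set.add st.2 p))
        (stack, vis)
    pvDfs rev fuel st.1 st.2

def colors_containing_alt (target : String) (colors : List (String × List String)) : Int :=
  let its := pvItems colors
  let rs := pvBuild target its
  let vis := PySem.Set.ofList rs.2
  ((pvDfs rs.1 (rs.2.length + its.length + 1) rs.2.reverse vis).length : Int)

-- ===== PRECONDITION & SPEC =====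
-- successors of x in A's propagation graph: keys listed in x's edges, provided x ≠ target
def pvSuccs (d : PySem.Dict String (List String)) (target x : String) : List String :=
  if x == target then [] else (d.getD x []).filter (fun y => d.contains y)

def pvStepR (d : PySem.Dict String (List String)) (target : String) (S : List String) : List String :=
  PySem.Set.update S (S.flatMap (pvSuccs d target))

-- forward closure: iterate the successor step
def pvIter (d : PySem.Dict String (List String)) (target : String) : Nat → List String → List String
  | 0, S => S
  | n+1, S => pvIter d target n (pvStepR d target S)

-- predecessor step (one BFS level of A, as a set) and the colors A ever enqueues
def pvRStep (its : List (String × List String)) (target : String) (S : List String) : List String :=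
  PySem.Set.update S (S.flatMap (pvNexts its target))

def pvRIter (its : List (String × List String)) (target : String) :
    Nat → List String → List String
  | 0, S => S
  | n+1, S => pvRIter its target n (pvRStep its target S)

-- all colors reachable by A's propagation from the colors directly containing target
def pvReach (d : PySem.Dict String (List String)) (target : String) : List String :=
  pvRIter d.items target d.keys.length
    ((d.items.filter (fun kv => kv.2.contains target)).map (fun kv => kv.1))

-- Pre_ excludes exactly the inputs on which the Python A DIVERGES (never returns): those whose
-- containment graph has a directed cycle (not through target) reachable from the colors that
-- directly contain target — A has no visited guard, so it re-enqueues such a cycle forever.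
def Pre_colors_containing (target : String) (colors : List (String × List String)) : Prop :=
  ∀ x ∈ pvReach (PySem.Dict.ofList colors) target,
    x ∉ pvIter (PySem.Dict.ofList colors) target ((PySem.Dict.ofList colors).keys.length)
        (pvSuccs (PySem.Dict.ofList colors) target x)

instance (target : String) (colors : List (String × List String)) : Decidable (Pre_colors_containing target colors) := by
  unfold Pre_colors_containing; infer_instance

def pvWitness_colors_containing : String × (List (String × List String)) :=
  ("t", [("a", ["t"]), ("b", ["a"])])

def Spec_colors_containing (target : String) (colors : List (String × List String)) (out : Int) : Prop := out = colors_containing_alt target colors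
instance (target : String) (colors : List (String × List String)) (out : Int) : Decidable (Spec_colors_containing target colors out) := by unfold Spec_colors_containing; infer_instance

-- ===== CLAIM (what is proved, stated in full; the proofs are below) =====
def Claim_equal_colors_containing : Prop := ∀ (target : String) (colors : List (String × List String)), Dom_colors_containing target colors → Pre_colors_containing target colors → Spec_colors_containing target colors (colors_containing target colors)

-- ===== LEMMAS AND PROOFS =====

-- the propagation edge of A: p ≠ target is a key whose edge list contains the key c
def pvEdge (its : List (String × List String)) (target p c : String) : Prop :=
  p ≠ target ∧ (∃ es, (p, es) ∈ its ∧ c ∈ es) ∧ (∃ es, (c, es) ∈ its)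

-- the set A counts: colors directly containing target, closed under pvEdge predecessors
inductive pvInS (its : List (String × List String)) (target : String) : String → Prop
  | seed (c es) : (c, es) ∈ its → target ∈ es → pvInS its target c
  | step (p es c) : (p, es) ∈ its → p ≠ target → c ∈ es → pvInS its target c → pvInS its target p

lemma pvInS_key {its : List (String × List String)} {target x : String}
    (h : pvInS its target x) : ∃ es, (x, es) ∈ its := by
  cases h with
  | seed c es h1 h2 => exact ⟨es, h1⟩
  | step p es c h1 h2 h3 h4 => exact ⟨es, h1⟩

lemma mem_pvNexts {its : List (String × List String)} {target c p : String} :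
    p ∈ pvNexts its target c ↔ p ≠ target ∧ ∃ es, (p, es) ∈ its ∧ c ∈ es := by
  simp only [pvNexts, List.mem_map, List.mem_filter, Bool.and_eq_true, bne_iff_ne, ne_eq,
    List.contains_iff_mem]
  constructor
  · rintro ⟨⟨a, es⟩, ⟨hm, hne, hc⟩, rfl⟩
    exact ⟨hne, es, hm, hc⟩
  · rintro ⟨hne, es, hm, hc⟩
    exact ⟨(p, es), ⟨hm, hne, hc⟩, rfl⟩

lemma mem_pvSeeds {its : List (String × List String)} {target c : String} :
    c ∈ (its.filter (fun kv => kv.2.contains target)).map (fun kv => kv.1) ↔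
      ∃ es, (c, es) ∈ its ∧ target ∈ es := by
  simp only [List.mem_map, List.mem_filter, List.contains_iff_mem]
  constructor
  · rintro ⟨⟨a, es⟩, ⟨hm, ht⟩, rfl⟩
    exact ⟨es, hm, ht⟩
  · rintro ⟨es, hm, ht⟩
    exact ⟨(c, es), ⟨hm, ht⟩, rfl⟩

lemma pvLevelA_aux (its : List (String × List String)) (target : String) :
    ∀ (q : List String) (vis acc : List String),
      q.foldl (fun st c => (PySem.Set.add st.1 c, st.2 ++ pvNexts its target c)) (vis, acc)
        = (PySem.Set.update vis q, acc ++ q.flatMap (pvNexts its target)) := by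
  intro q
  induction q with
  | nil => intro vis acc; simp [PySem.Set.update_nil]
  | cons c q ih =>
      intro vis acc
      simp only [List.foldl_cons, ih, PySem.Set.update_cons, List.flatMap_cons, List.append_assoc]

lemma pvLevelA_eq (its : List (String × List String)) (target : String)
    (q vis : List String) :
    pvLevelA its target q vis = (PySem.Set.update vis q, q.flatMap (pvNexts its target)) := by
  simpa using pvLevelA_aux its target q vis []

-- pvIter basics
lemma subset_pvStepR (d : PySem.Dict String (List String)) (target : String)
    (S : List String) : S ⊆ pvStepR d target S := by
  intro x hx
  unfold pvStepR
  rw [PySem.Set.mem_update]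
  exact Or.inl hx

lemma subset_pvIter (d : PySem.Dict String (List String)) (target : String) :
    ∀ (n : Nat) (S : List String), S ⊆ pvIter d target n S := by
  intro n
  induction n with
  | zero => intro S x hx; exact hx
  | succ n ih =>
      intro S x hx
      show x ∈ pvIter d target n (pvStepR d target S)
      exact ih _ (subset_pvStepR d target S hx)

lemma pvIter_add (d : PySem.Dict String (List String)) (target : String) :
    ∀ (m k : Nat) (S : List String),
      pvIter d target (m + k) S = pvIter d target k (pvIter d target m S) := by
  intro m
  induction m with
  | zero => intro k S; simp [pvIter]
  | succ m ih =>
      intro k S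
      have h1 : m + 1 + k = (m + k) + 1 := by omega
      rw [h1]
      show pvIter d target (m + k) (pvStepR d target S) = _
      rw [ih k (pvStepR d target S)]
      rfl

lemma pvIter_mono (d : PySem.Dict String (List String)) (target : String)
    {m n : Nat} (h : m ≤ n) (S : List String) :
    pvIter d target m S ⊆ pvIter d target n S := by
  obtain ⟨k, rfl⟩ := Nat.le.dest h
  rw [pvIter_add]
  exact subset_pvIter d target k _

-- pvRIter basics
lemma subset_pvRStep (its : List (String × List String)) (target : String)
    (S : List String) : S ⊆ pvRStep its target S := by
  intro x hx
  unfold pvRStep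
  rw [PySem.Set.mem_update]
  exact Or.inl hx

lemma pvRIter_succ_comm (its : List (String × List String)) (target : String) :
    ∀ (n : Nat) (S : List String),
      pvRIter its target (n + 1) S = pvRStep its target (pvRIter its target n S) := by
  intro n
  induction n with
  | zero => intro S; rfl
  | succ n ih =>
      intro S
      show pvRIter its target (n + 1) (pvRStep its target S) = _
      rw [ih (pvRStep its target S)]
      rfl

lemma pvRIter_fix (its : List (String × List String)) (target : String)
    {S : List String} (h : pvRStep its target S = S) :
    ∀ n, pvRIter its target n S = S := by
  intro n
  induction n with
  | zero => rfl
  | succ n ih =>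
      show pvRIter its target n (pvRStep its target S) = S
      rw [h]; exact ih

lemma pvRIter_nodup (its : List (String × List String)) (target : String) :
    ∀ (n : Nat) (S : List String), S.Nodup → (pvRIter its target n S).Nodup := by
  intro n
  induction n with
  | zero => intro S h; exact h
  | succ n ih =>
      intro S h
      exact ih _ (PySem.Set.nodup_update S _ h)

lemma pvRIter_sub_keys (its : List (String × List String)) (target : String) :
    ∀ (n : Nat) (S : List String), (∀ x ∈ S, x ∈ its.map (fun kv => kv.1)) →
      ∀ x ∈ pvRIter its target n S, x ∈ its.map (fun kv => kv.1) := by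
  intro n
  induction n with
  | zero => intro S h; exact h
  | succ n ih =>
      intro S h
      refine ih _ ?_
      intro x hx
      rcases (PySem.Set.mem_update S _ x).1 hx with hx | hx
      · exact h x hx
      · obtain ⟨c, _, hxc⟩ := List.mem_flatMap.1 hx
        obtain ⟨_, es, hmem, _⟩ := mem_pvNexts.1 hxc
        exact List.mem_map.2 ⟨(x, es), hmem, rfl⟩

lemma pvRIter_len_lb (its : List (String × List String)) (target : String) :
    ∀ (n : Nat) (S : List String), S.Nodup →
      (∀ j < n, pvRStep its target (pvRIter its target j S) ≠ pvRIter its target j S) →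
      S.length + n ≤ (pvRIter its target n S).length := by
  intro n
  induction n with
  | zero => intro S _ _; simp [pvRIter]
  | succ n ih =>
      intro S hnd hne
      have h1 : S.length + n ≤ (pvRIter its target n S).length :=
        ih S hnd (fun j hj => hne j (by omega))
      rw [pvRIter_succ_comm]
      have hndn : (pvRIter its target n S).Nodup := pvRIter_nodup its target n S hnd
      have happ := PySem.Set.update_eq_append_filter (pvRIter its target n S)
        ((pvRIter its target n S).flatMap (pvNexts its target))
      set t := (PySem.Set.ofList ((pvRIter its target n S).flatMap (pvNexts its target))).filter
        (fun y => !(PySem.Set.contains (pvRIter its target n S) y)) with ht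
      by_cases htn : t = []
      · exfalso
        apply hne n (by omega)
        show pvRStep its target (pvRIter its target n S) = _
        unfold pvRStep
        rw [happ, htn, List.append_nil]
      · have : 0 < t.length := List.length_pos_iff.2 htn
        have : (pvRStep its target (pvRIter its target n S)).length
            = (pvRIter its target n S).length + t.length := by
          unfold pvRStep; rw [happ, List.length_append]
        omega

lemma nodup_sub_len {K S : List String} (hK : K.Nodup) (hS : S.Nodup)
    (hsub : ∀ x ∈ S, x ∈ K) : S.length ≤ K.length := by
  have h1 : S.toFinset.card = S.length := List.toFinset_card_of_nodup hS
  have h2 : K.toFinset.card = K.length := List.toFinset_card_of_nodup hK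
  have h3 : S.toFinset ⊆ K.toFinset := by
    intro a ha
    exact List.mem_toFinset.2 (hsub a (List.mem_toFinset.1 ha))
  have := Finset.card_le_card h3
  omega

-- after |keys| rounds the reach iteration has stabilised
lemma pvRIter_stable (its : List (String × List String)) (target : String)
    (S : List String) (hK : (its.map (fun kv => kv.1)).Nodup) (hS : S.Nodup)
    (hsub : ∀ x ∈ S, x ∈ its.map (fun kv => kv.1)) :
    pvRStep its target (pvRIter its target (its.map (fun kv => kv.1)).length S)
      = pvRIter its target (its.map (fun kv => kv.1)).length S := by
  set N := (its.map (fun kv => kv.1)).length with hN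
  by_cases hfix : ∃ j, j ≤ N ∧ pvRStep its target (pvRIter its target j S) = pvRIter its target j S
  · obtain ⟨j, hj, hfj⟩ := hfix
    have hRN : pvRIter its target N S = pvRIter its target j S := by
      have hadd : ∀ m k (T : List String),
          pvRIter its target (m + k) T = pvRIter its target k (pvRIter its target m T) := by
        intro m
        induction m with
        | zero => intro k T; simp [pvRIter]
        | succ m ihm =>
            intro k T
            have h1 : m + 1 + k = (m + k) + 1 := by omega
            rw [h1]
            show pvRIter its target (m + k) (pvRStep its target T) = _
            rw [ihm k (pvRStep its target T)]
            rfl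
      obtain ⟨k, hk⟩ := Nat.le.dest hj
      rw [← hk, hadd, pvRIter_fix its target hfj]
    rw [hRN, hfj]
  · exfalso
    push Not at hfix
    have hlb := pvRIter_len_lb its target (N + 1) S hS
      (fun j hj => hfix j (by omega))
    have hub : (pvRIter its target (N + 1) S).length ≤ N := by
      refine nodup_sub_len hK (pvRIter_nodup its target (N + 1) S hS) ?_
      exact pvRIter_sub_keys its target (N + 1) S hsub
    omega

-- every color in A's closure is in the computed reach set
lemma pvInS_mem_reach (d : PySem.Dict String (List String)) (target : String)
    (hnd : d.keys.Nodup) {x : String} (hx : pvInS d.items target x) :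
    x ∈ pvReach d target := by
  have hkeys : d.keys = d.items.map (fun kv => kv.1) := rfl
  set its := d.items with hits
  set seeds := (its.filter (fun kv => kv.2.contains target)).map (fun kv => kv.1) with hseeds
  have hKnd : (its.map (fun kv => kv.1)).Nodup := by rw [← hkeys]; exact hnd
  have hSnd : seeds.Nodup := by
    have hsl : seeds.Sublist (its.map (fun kv => kv.1)) :=
      List.Sublist.map (fun kv : String × List String => kv.1)
        (List.filter_sublist (l := its))
    exact hKnd.sublist hsl
  have hSsub : ∀ y ∈ seeds, y ∈ its.map (fun kv => kv.1) := by
    intro y hy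
    obtain ⟨es, hmem, _⟩ := mem_pvSeeds.1 hy
    exact List.mem_map.2 ⟨(y, es), hmem, rfl⟩
  have hstab := pvRIter_stable its target seeds hKnd hSnd hSsub
  have hNeq : d.keys.length = (its.map (fun kv => kv.1)).length := by rw [hkeys]
  have hreach : pvReach d target = pvRIter its target (its.map (fun kv => kv.1)).length seeds := by
    unfold pvReach
    rw [hNeq]
  rw [hreach]
  set R := pvRIter its target (its.map (fun kv => kv.1)).length seeds with hR
  have hseedsub : seeds ⊆ R := by
    have : ∀ n (T : List String), T ⊆ pvRIter its target n T := by
      intro n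
      induction n with
      | zero => intro T y hy; exact hy
      | succ n ihn =>
          intro T y hy
          show y ∈ pvRIter its target n (pvRStep its target T)
          exact ihn _ (subset_pvRStep its target T hy)
    exact this _ _
  induction hx with
  | seed c es h1 h2 => exact hseedsub (mem_pvSeeds.2 ⟨es, h1, h2⟩)
  | step p es c h1 h2 h3 h4 ih =>
      have hcR : c ∈ R := ih
      have hpN : p ∈ pvNexts its target c := mem_pvNexts.2 ⟨h2, es, h1, h3⟩
      have : p ∈ pvRStep its target R := by
        unfold pvRStep
        rw [PySem.Set.mem_update]
        exact Or.inr (List.mem_flatMap.2 ⟨c, hcR, hpN⟩)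
      rwa [hstab] at this

lemma pvEdge_mem_succs {d : PySem.Dict String (List String)} {target y z : String}
    (hnd : d.keys.Nodup) (h : pvEdge d.items target y z) : z ∈ pvSuccs d target y := by
  obtain ⟨hne, ⟨es, hmem, hz⟩, ⟨es', hmem'⟩⟩ := h
  unfold pvSuccs
  have hbeq : (y == target) = false := by simp [hne]
  rw [hbeq]
  simp only [Bool.false_eq_true, if_false, List.mem_filter]
  refine ⟨?_, ?_⟩
  · rw [PySem.Dict.getD_of_mem_items d hmem hnd]
    exact hz
  · rw [PySem.Dict.contains_iff_mem_keys]
    exact PySem.Dict.mem_keys_of_mem_items d hmem'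

lemma pvIter_step_mem (d : PySem.Dict String (List String)) (target : String)
    (hnd : d.keys.Nodup) :
    ∀ (n : Nat) (S : List String) (y z : String), y ∈ pvIter d target n S →
      pvEdge d.items target y z → z ∈ pvIter d target (n + 1) S := by
  intro n
  induction n with
  | zero =>
      intro S y z hy he
      show z ∈ pvStepR d target S
      unfold pvStepR
      rw [PySem.Set.mem_update]
      exact Or.inr (List.mem_flatMap.2 ⟨y, hy, pvEdge_mem_succs hnd he⟩)
  | succ n ih =>
      intro S y z hy he
      show z ∈ pvIter d target (n + 1) (pvStepR d target S)
      exact ih (pvStepR d target S) y z hy he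

-- acyclicity hypothesis (= Pre_ read on the dict): a cycle f i → … → f j = f i is impossible
lemma pv_cycle_absurd {d : PySem.Dict String (List String)} {target : String}
    (hP : ∀ x ∈ pvReach d target, x ∉ pvIter d target d.keys.length (pvSuccs d target x))
    (hnd : d.keys.Nodup)
    (f : Nat → String)
    (hf : ∀ i ≤ d.keys.length, pvEdge d.items target (f i) (f (i + 1)))
    (hreach : ∀ i ≤ d.keys.length, f i ∈ pvReach d target)
    (i j : Nat) (hij : i < j) (hjN : j ≤ d.keys.length) (hfeq : f i = f j) : False := by
  set N := d.keys.length with hN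
  have main : ∀ m, i + 1 + m ≤ N + 1 →
      f (i + 1 + m) ∈ pvIter d target m (pvSuccs d target (f i)) := by
    intro m
    induction m with
    | zero =>
        intro hm
        show f (i + 1) ∈ pvIter d target 0 (pvSuccs d target (f i))
        exact pvEdge_mem_succs hnd (hf i (by omega))
    | succ m ih =>
        intro hm
        have h1 : f (i + 1 + m) ∈ pvIter d target m (pvSuccs d target (f i)) := ih (by omega)
        have h2 : pvEdge d.items target (f (i + 1 + m)) (f (i + 1 + m + 1)) :=
          hf (i + 1 + m) (by omega)
        have := pvIter_step_mem d target hnd m _ _ _ h1 h2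
        have harith : i + 1 + (m + 1) = i + 1 + m + 1 := by omega
        rw [harith]
        exact this
  have hj' : f j ∈ pvIter d target (j - i - 1) (pvSuccs d target (f i)) := by
    have harith : i + 1 + (j - i - 1) = j := by omega
    have := main (j - i - 1) (by omega)
    rwa [harith] at this
  have hsub : pvIter d target (j - i - 1) (pvSuccs d target (f i)) ⊆
      pvIter d target N (pvSuccs d target (f i)) :=
    pvIter_mono d target (by omega) _
  have h5 := hsub hj'
  rw [← hfeq] at h5
  exact hP (f i) (hreach i (by omega)) h5

-- no pvEdge-path of keys.length + 1 consecutive edges through A's closure exists under Pre_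
lemma pv_no_long_path {d : PySem.Dict String (List String)} {target : String}
    (hP : ∀ x ∈ pvReach d target, x ∉ pvIter d target d.keys.length (pvSuccs d target x))
    (hnd : d.keys.Nodup)
    (f : Nat → String)
    (hf : ∀ i ≤ d.keys.length, pvEdge d.items target (f i) (f (i + 1)))
    (hfS : ∀ i ≤ d.keys.length, pvInS d.items target (f i)) : False := by
  set N := d.keys.length with hN
  have hkey : ∀ i, i ≤ N → f i ∈ d.keys := by
    intro i hi
    obtain ⟨_, ⟨es, hmem, _⟩, _⟩ := hf i hi
    exact PySem.Dict.mem_keys_of_mem_items d hmem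
  have hreach : ∀ i, i ≤ N → f i ∈ pvReach d target :=
    fun i hi => pvInS_mem_reach d target hnd (hfS i hi)
  have hcard : d.keys.toFinset.card < N + 1 := by
    have := List.toFinset_card_le d.keys
    omega
  obtain ⟨i, hi, j, hj, hij, hfij⟩ :=
    Finset.exists_ne_map_eq_of_card_lt_of_maps_to (s := Finset.range (N + 1))
      (t := d.keys.toFinset)
      (f := f)
      (by simpa using hcard)
      (fun i hi => List.mem_toFinset.2 (hkey i (Nat.lt_succ_iff.1 (Finset.mem_range.1 hi))))
  simp only [Finset.mem_range] at hi hj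
  rcases Nat.lt_or_ge i j with hlt | hge
  · exact pv_cycle_absurd hP hnd f hf hreach i j hlt (by omega) hfij
  · have hlt : j < i := by omega
    exact pv_cycle_absurd hP hnd f hf hreach j i hlt (by omega) hfij.symm

-- explicit finite paths out of a color, staying inside A's closure
def pvPathFrom (its : List (String × List String)) (target x : String) (k : Nat) : Prop :=
  ∃ f : Nat → String, f 0 = x ∧ (∀ i < k, pvEdge its target (f i) (f (i + 1)))
    ∧ (∀ i ≤ k, pvInS its target (f i))

lemma pvPathFrom_mono {its : List (String × List String)} {target x : String} {k k' : Nat}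
    (h : k' ≤ k) : pvPathFrom its target x k → pvPathFrom its target x k' := by
  rintro ⟨f, h0, hf, hfS⟩
  exact ⟨f, h0, fun i hi => hf i (by omega), fun i hi => hfS i (by omega)⟩

lemma pvPathFrom_cons {its : List (String × List String)} {target p x : String} {k : Nat}
    (he : pvEdge its target p x) (h : pvPathFrom its target x k) :
    pvPathFrom its target p (k + 1) := by
  obtain ⟨f, h0, hf, hfS⟩ := h
  have hxS : pvInS its target x := h0 ▸ hfS 0 (by omega)
  have hpS : pvInS its target p := by
    obtain ⟨hne, ⟨es, hmem, hxes⟩, _⟩ := he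
    exact pvInS.step p es x hmem hne hxes hxS
  refine ⟨fun i => if i = 0 then p else f (i - 1), by simp, ?_, ?_⟩
  · intro i hi
    rcases Nat.eq_zero_or_pos i with rfl | hpos
    · simpa [h0] using he
    · have h1 : ¬ (i = 0) := by omega
      have h2 : ¬ (i + 1 = 0) := by omega
      simp only [h1, h2, if_false]
      have h3 : i + 1 - 1 = (i - 1) + 1 := by omega
      rw [h3]
      exact hf (i - 1) (by omega)
  · intro i hi
    rcases Nat.eq_zero_or_pos i with rfl | hpos
    · simpa using hpS
    · have h1 : ¬ (i = 0) := by omega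
      simp only [h1, if_false]
      exact hfS (i - 1) (by omega)

-- A's while-loop computes exactly the pvInS set (and terminates within its fuel) under Pre_
lemma pvLoopA_spec (d : PySem.Dict String (List String)) (target : String)
    (hP : ∀ x ∈ pvReach d target, x ∉ pvIter d target d.keys.length (pvSuccs d target x))
    (hnd : d.keys.Nodup) :
    ∀ (fuel : Nat) (q vis : List String),
      (∀ x ∈ q, pvInS d.items target x) →
      (∀ x ∈ vis, pvInS d.items target x) →
      (∀ s, pvInS d.items target s →
        s ∈ vis ∨ ∃ c ∈ q, Relation.ReflTransGen (pvEdge d.items target) s c) →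
      (∀ x ∈ q, pvPathFrom d.items target x (d.keys.length + 1 - fuel)) →
      vis.Nodup →
      ((pvLoopA d.items target fuel q vis).Nodup ∧
        ∀ x, x ∈ pvLoopA d.items target fuel q vis ↔ pvInS d.items target x) := by
  intro fuel
  induction fuel with
  | zero =>
      intro q vis h1 h2 h3 h4 hnd'
      have hq : q = [] := by
        cases q with
        | nil => rfl
        | cons c q' =>
            exfalso
            obtain ⟨f, h0, hf, hfS⟩ := h4 c (List.mem_cons_self ..)
            exact pv_no_long_path hP hnd f (fun i hi => hf i (by omega))
              (fun i hi => hfS i (by omega))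
      subst hq
      refine ⟨hnd', fun x => ⟨fun hx => h2 x hx, fun hx => ?_⟩⟩
      rcases h3 x hx with h | ⟨c, hc, _⟩
      · exact h
      · simp at hc
  | succ fuel ih =>
      intro q vis h1 h2 h3 h4 hnd'
      by_cases hq : q = []
      · subst hq
        have : pvLoopA d.items target (fuel + 1) [] vis = vis := by
          simp [pvLoopA]
        rw [this]
        refine ⟨hnd', fun x => ⟨fun hx => h2 x hx, fun hx => ?_⟩⟩
        rcases h3 x hx with h | ⟨c, hc, _⟩
        · exact h
        · simp at hc
      · have hrw : pvLoopA d.items target (fuel + 1) q vis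
            = pvLoopA d.items target fuel (q.flatMap (pvNexts d.items target))
                (PySem.Set.update vis q) := by
          simp only [pvLoopA, pvLevelA_eq]
          rw [if_neg (by simpa [List.isEmpty_iff] using hq)]
        rw [hrw]
        have h1' : ∀ x ∈ q.flatMap (pvNexts d.items target), pvInS d.items target x := by
          intro x hx
          obtain ⟨c, hc, hxc⟩ := List.mem_flatMap.1 hx
          obtain ⟨hne, es, hmem, hces⟩ := mem_pvNexts.1 hxc
          exact pvInS.step x es c hmem hne hces (h1 c hc)
        have h2' : ∀ x ∈ PySem.Set.update vis q, pvInS d.items target x := by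
          intro x hx
          rcases (PySem.Set.mem_update vis q x).1 hx with h | h
          · exact h2 x h
          · exact h1 x h
        have h3' : ∀ s, pvInS d.items target s →
            s ∈ PySem.Set.update vis q ∨
              ∃ c ∈ q.flatMap (pvNexts d.items target),
                Relation.ReflTransGen (pvEdge d.items target) s c := by
          intro s hs
          rcases h3 s hs with h | ⟨c, hc, hrtg⟩
          · exact Or.inl ((PySem.Set.mem_update vis q s).2 (Or.inl h))
          · rcases Relation.ReflTransGen.cases_tail hrtg with heq | ⟨m, hm, he⟩
            · subst heq
              exact Or.inl ((PySem.Set.mem_update vis q c).2 (Or.inr hc))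
            · refine Or.inr ⟨m, ?_, hm⟩
              exact List.mem_flatMap.2 ⟨c, hc, mem_pvNexts.2 ⟨he.1, he.2.1⟩⟩
        have h4' : ∀ x ∈ q.flatMap (pvNexts d.items target),
            pvPathFrom d.items target x (d.keys.length + 1 - fuel) := by
          intro x hx
          obtain ⟨c, hc, hxc⟩ := List.mem_flatMap.1 hx
          obtain ⟨hne, es, hmem, hces⟩ := mem_pvNexts.1 hxc
          have he : pvEdge d.items target x c := ⟨hne, ⟨es, hmem, hces⟩, pvInS_key (h1 c hc)⟩
          have hp := pvPathFrom_cons he (h4 c hc)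
          exact pvPathFrom_mono (by omega) hp
        exact ih _ _ h1' h2' h3' h4' (PySem.Set.nodup_update vis q hnd')

-- B helpers: the rev-building inner loop, the one-pass builder, the DFS fold and loop
lemma pvRevInner (x : String) (g : List String) (d : PySem.Dict String (List String))
    (c z : String) :
    z ∈ (g.foldl (fun d e => d.modify e [] (fun l => l ++ [x])) d).getD c [] ↔
      z ∈ d.getD c [] ∨ (z = x ∧ c ∈ g) := by
  have hmap : g.foldl (fun d e => d.modify e [] (fun l => l ++ [x])) d
      = (g.map (fun e => (e, x))).foldl (fun d p => d.modify p.1 [] (fun l => l ++ [p.2])) d := by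
    rw [List.foldl_map]
  rw [hmap, PySem.Dict.getD_foldl_modify_append]
  simp only [List.mem_append, List.mem_map, List.mem_filter]
  constructor
  · rintro (h | ⟨p, ⟨⟨e, he, rfl⟩, hc⟩, rfl⟩)
    · exact Or.inl h
    · simp only [beq_iff_eq] at hc
      exact Or.inr ⟨rfl, hc ▸ he⟩
  · rintro (h | ⟨rfl, hc⟩)
    · exact Or.inl h
    · exact Or.inr ⟨(c, z), ⟨⟨c, hc, rfl⟩, by simp⟩, rfl⟩

lemma pvBuild_aux (target : String) :
    ∀ (its : List (String × List String)) (st : PySem.Dict String (List String) × List String),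
      ((its.foldl (pvBStep target) st).2
          = st.2 ++ (its.filter (fun kv => kv.2.contains target)).map (fun kv => kv.1))
      ∧ ∀ c x, x ∈ (its.foldl (pvBStep target) st).1.getD c [] ↔
          x ∈ st.1.getD c [] ∨ (x ≠ target ∧ ∃ es, (x, es) ∈ its ∧ c ∈ es) := by
  intro its
  induction its with
  | nil => intro st; simp
  | cons kv rest ih =>
      intro st
      have hstep : (kv :: rest).foldl (pvBStep target) st
          = rest.foldl (pvBStep target) (pvBStep target st kv) := by
        simp [List.foldl_cons]
      obtain ⟨ih2, ih1⟩ := ih (pvBStep target st kv)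
      constructor
      · rw [hstep, ih2]
        simp only [pvBStep]
        by_cases ht : target ∈ kv.2
        · simp [ht]
        · simp [ht]
      · intro c x
        rw [hstep, ih1 c x]
        show x ∈ (pvBStep target st kv).1.getD c [] ∨ _ ↔ _
        simp only [pvBStep]
        by_cases hkt : kv.1 = target
        · rw [if_neg (by simp [hkt])]
          constructor
          · rintro (h | ⟨hne, es, hmem, hc⟩)
            · exact Or.inl h
            · exact Or.inr ⟨hne, es, List.mem_cons_of_mem _ hmem, hc⟩
          · rintro (h | ⟨hne, es, hmem, hc⟩)
            · exact Or.inl h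
            · rcases List.mem_cons.1 hmem with heq | hmem'
              · exfalso
                have : x = kv.1 := by
                  have := congrArg Prod.fst heq
                  simpa using this
                exact hne (this.trans hkt)
              · exact Or.inr ⟨hne, es, hmem', hc⟩
        · rw [if_pos (by simpa using hkt)]
          rw [pvRevInner]
          constructor
          · rintro ((h | ⟨rfl, hc⟩) | ⟨hne, es, hmem, hc⟩)
            · exact Or.inl h
            · exact Or.inr ⟨hkt, kv.2, by simp, hc⟩
            · exact Or.inr ⟨hne, es, List.mem_cons_of_mem _ hmem, hc⟩
          · rintro (h | ⟨hne, es, hmem, hc⟩)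
            · exact Or.inl (Or.inl h)
            · rcases List.mem_cons.1 hmem with heq | hmem'
              · have hx : x = kv.1 := by
                  have := congrArg Prod.fst heq
                  simpa using this
                have hes : es = kv.2 := by
                  have := congrArg Prod.snd heq
                  simpa using this
                exact Or.inl (Or.inr ⟨hx, hes ▸ hc⟩)
              · exact Or.inr ⟨hne, es, hmem', hc⟩

lemma pvDfsFold (l : List String) :
    ∀ (stack vis : List String), vis.Nodup →
      ∃ news : List String,
        l.foldl (fun st p => if PySem.Set.contains st.2 p then st
            else (p :: st.1, PySem.Set.add st.2 p)) (stack, vis)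
          = (news.reverse ++ stack, vis ++ news)
        ∧ news.Nodup ∧ (∀ p ∈ news, p ∈ l ∧ p ∉ vis) ∧ (∀ p ∈ l, p ∈ vis ∨ p ∈ news) := by
  induction l with
  | nil =>
      intro stack vis _
      exact ⟨[], by simp, by simp, by simp, by simp⟩
  | cons p rest ih =>
      intro stack vis hnd
      by_cases hp : p ∈ vis
      · have hc : PySem.Set.contains vis p = true := (PySem.Set.contains_iff vis p).2 hp
        have hstep : (p :: rest).foldl (fun st p => if PySem.Set.contains st.2 p then st
              else (p :: st.1, PySem.Set.add st.2 p)) (stack, vis)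
            = rest.foldl (fun st p => if PySem.Set.contains st.2 p then st
              else (p :: st.1, PySem.Set.add st.2 p)) (stack, vis) := by
          simp [List.foldl_cons, hp]
        obtain ⟨news, heq, h2, h3, h4⟩ := ih stack vis hnd
        refine ⟨news, by rw [hstep]; exact heq, h2, ?_, ?_⟩
        · exact fun q hq => ⟨List.mem_cons_of_mem _ (h3 q hq).1, (h3 q hq).2⟩
        · intro q hq
          rcases List.mem_cons.1 hq with rfl | hq'
          · exact Or.inl hp
          · exact h4 q hq'
      · have hc : PySem.Set.contains vis p = false := by
          rcases Bool.eq_false_or_eq_true (PySem.Set.contains vis p) with h | h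
          · exact absurd ((PySem.Set.contains_iff vis p).1 h) hp
          · exact h
        have hstep : (p :: rest).foldl (fun st p => if PySem.Set.contains st.2 p then st
              else (p :: st.1, PySem.Set.add st.2 p)) (stack, vis)
            = rest.foldl (fun st p => if PySem.Set.contains st.2 p then st
              else (p :: st.1, PySem.Set.add st.2 p)) (p :: stack, vis ++ [p]) := by
          simp [List.foldl_cons, hp]
        have hnd2 : (vis ++ [p]).Nodup := by
          rw [List.nodup_append]
          refine ⟨hnd, List.nodup_singleton p, ?_⟩
          intro a ha b hb heq
          rw [List.mem_singleton] at hb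
          subst hb
          exact hp (heq ▸ ha)
        obtain ⟨news, heq, h2, h3, h4⟩ := ih (p :: stack) (vis ++ [p]) hnd2
        have hpn : p ∉ news := fun hpn => (h3 p hpn).2 (by simp)
        refine ⟨p :: news, ?_, ?_, ?_, ?_⟩
        · rw [hstep, heq]
          simp
        · exact List.nodup_cons.2 ⟨hpn, h2⟩
        · intro q hq
          rcases List.mem_cons.1 hq with rfl | hq'
          · exact ⟨List.mem_cons_self .., hp⟩
          · refine ⟨List.mem_cons_of_mem _ (h3 q hq').1, fun hqv => (h3 q hq').2 (by simp [hqv])⟩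
        · intro q hq
          rcases List.mem_cons.1 hq with rfl | hq'
          · exact Or.inr (List.mem_cons_self ..)
          · rcases h4 q hq' with h | h
            · rcases List.mem_append.1 h with h' | h'
              · exact Or.inl h'
              · simp only [List.mem_singleton] at h'
                exact Or.inr (h' ▸ List.mem_cons_self ..)
            · exact Or.inr (List.mem_cons_of_mem _ h)

-- B's DFS returns exactly the closure of its visited start set (and its fuel never runs out)
lemma pvDfs_spec (rev : PySem.Dict String (List String))
    (its : List (String × List String)) (target : String)
    (hrevK : ∀ c p, p ∈ rev.getD c [] → p ∈ its.map (fun kv => kv.1))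
    (hrevS : ∀ c p, pvInS its target c → p ∈ rev.getD c [] → pvInS its target p) :
    ∀ (fuel : Nat) (stack vis : List String),
      stack.length + ((its.map (fun kv => kv.1)).toFinset \ vis.toFinset).card < fuel →
      (∀ c ∈ stack, c ∈ vis) →
      vis.Nodup →
      (∀ x ∈ vis, pvInS its target x) →
      (∀ x ∈ vis, x ∉ stack → ∀ p ∈ rev.getD x [], p ∈ vis) →
      ((pvDfs rev fuel stack vis).Nodup ∧
        (∀ x ∈ vis, x ∈ pvDfs rev fuel stack vis) ∧
        (∀ x ∈ pvDfs rev fuel stack vis, pvInS its target x) ∧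
        (∀ x ∈ pvDfs rev fuel stack vis, ∀ p ∈ rev.getD x [], p ∈ pvDfs rev fuel stack vis)) := by
  intro fuel
  induction fuel with
  | zero =>
      intro stack vis hfuel
      exact absurd hfuel (by omega)
  | succ fuel ih =>
      intro stack vis hfuel hsv hnd hvS hJ
      cases stack with
      | nil =>
          have hres : pvDfs rev (fuel + 1) [] vis = vis := by simp [pvDfs]
          rw [hres]
          exact ⟨hnd, fun x hx => hx, hvS, fun x hx => hJ x hx (by simp)⟩
      | cons c rest =>
          obtain ⟨news, heq, hndn, hfresh, hcover⟩ := pvDfsFold (rev.getD c []) rest vis hnd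
          have hrw : pvDfs rev (fuel + 1) (c :: rest) vis
              = pvDfs rev fuel (news.reverse ++ rest) (vis ++ news) := by
            show pvDfs rev fuel ((rev.getD c []).foldl _ (rest, vis)).1
                ((rev.getD c []).foldl _ (rest, vis)).2 = _
            rw [heq]
          rw [hrw]
          have hnewsK : ∀ p ∈ news, p ∈ its.map (fun kv => kv.1) :=
            fun p hp => hrevK c p (hfresh p hp).1
          have hnewsF : ∀ p ∈ news, p ∉ vis := fun p hp => (hfresh p hp).2
          -- measure bookkeeping
          have hset : (its.map (fun kv => kv.1)).toFinset \ (vis ++ news).toFinset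
              = ((its.map (fun kv => kv.1)).toFinset \ vis.toFinset) \ news.toFinset := by
            ext a
            simp only [Finset.mem_sdiff, List.toFinset_append, Finset.mem_union]
            tauto
          have hsubn : news.toFinset ⊆ (its.map (fun kv => kv.1)).toFinset \ vis.toFinset := by
            intro a ha
            simp only [List.mem_toFinset] at ha
            simp only [Finset.mem_sdiff, List.mem_toFinset]
            exact ⟨hnewsK a ha, hnewsF a ha⟩
          have hcardn : news.toFinset.card = news.length := List.toFinset_card_of_nodup hndn
          have hlen : news.length ≤ ((its.map (fun kv => kv.1)).toFinset \ vis.toFinset).card := by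
            rw [← hcardn]
            exact Finset.card_le_card hsubn
          have hfuel' : (news.reverse ++ rest).length
              + ((its.map (fun kv => kv.1)).toFinset \ (vis ++ news).toFinset).card < fuel := by
            rw [hset, Finset.card_sdiff_of_subset hsubn, hcardn]
            simp only [List.length_append, List.length_reverse]
            simp only [List.length_cons] at hfuel
            omega
          have hsv' : ∀ x ∈ news.reverse ++ rest, x ∈ vis ++ news := by
            intro x hx
            rcases List.mem_append.1 hx with h | h
            · exact List.mem_append.2 (Or.inr (List.mem_reverse.1 h))
            · exact List.mem_append.2 (Or.inl (hsv x (List.mem_cons_of_mem _ h)))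
          have hnd' : (vis ++ news).Nodup := by
            rw [List.nodup_append]
            refine ⟨hnd, hndn, ?_⟩
            intro a ha b hb heq
            exact hnewsF b hb (heq ▸ ha)
          have hvS' : ∀ x ∈ vis ++ news, pvInS its target x := by
            intro x hx
            rcases List.mem_append.1 hx with h | h
            · exact hvS x h
            · exact hrevS c x (hvS c (hsv c (List.mem_cons_self ..))) (hfresh x h).1
          have hJ' : ∀ x ∈ vis ++ news, x ∉ news.reverse ++ rest →
              ∀ p ∈ rev.getD x [], p ∈ vis ++ news := by
            intro x hx hxs p hp
            rcases List.mem_append.1 hx with hxv | hxn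
            · by_cases hxc : x = c
              · subst hxc
                rcases hcover p hp with h | h
                · exact List.mem_append.2 (Or.inl h)
                · exact List.mem_append.2 (Or.inr h)
              · have hxr : x ∉ rest := fun h => hxs (List.mem_append.2 (Or.inr h))
                have hxst : x ∉ c :: rest := by
                  intro h
                  rcases List.mem_cons.1 h with h' | h'
                  · exact hxc h'
                  · exact hxr h'
                exact List.mem_append.2 (Or.inl (hJ x hxv hxst p hp))
            · exact absurd (List.mem_append.2 (Or.inl (List.mem_reverse.2 hxn))) hxs
          obtain ⟨c1, c2, c3, c4⟩ := ih (news.reverse ++ rest) (vis ++ news) hfuel' hsv' hnd' hvS' hJ'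
          exact ⟨c1, fun x hx => c2 x (List.mem_append.2 (Or.inl hx)), c3, c4⟩

-- ===== VERDICT (by name: the statement is the Claim_ definition above) =====
theorem colors_containing_spec : Claim_equal_colors_containing := by
  intro target colors hDom hPre
  show colors_containing target colors = colors_containing_alt target colors
  have hnd : (PySem.Dict.ofList colors).keys.Nodup := PySem.Dict.nodup_keys_ofList colors
  have hP : ∀ x ∈ pvReach (PySem.Dict.ofList colors) target,
      x ∉ pvIter (PySem.Dict.ofList colors) target (PySem.Dict.ofList colors).keys.length
        (pvSuccs (PySem.Dict.ofList colors) target x) := hPre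
  set d := PySem.Dict.ofList colors with hd
  have hits : pvItems colors = d.items := rfl
  set its := d.items with hitsd
  have hNits : d.keys.length = its.length := by
    show (d.items.map (fun p => p.1)).length = d.items.length
    exact List.length_map ..
  set seeds := (its.filter (fun kv => kv.2.contains target)).map (fun kv => kv.1) with hseeds
  -- A side
  have hseedInS : ∀ x ∈ seeds, pvInS its target x := by
    intro x hx
    obtain ⟨es, hmem, ht⟩ := mem_pvSeeds.1 hx
    exact pvInS.seed x es hmem ht
  have h30 : ∀ s, pvInS its target s →
      s ∈ ([] : List String) ∨ ∃ c ∈ seeds, Relation.ReflTransGen (pvEdge its target) s c := by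
    intro s hs
    right
    induction hs with
    | seed c es h1 h2 => exact ⟨c, mem_pvSeeds.2 ⟨es, h1, h2⟩, Relation.ReflTransGen.refl⟩
    | step p es c h1 h2 h3 h4 ih =>
        obtain ⟨c', hc', hrtg⟩ := ih
        exact ⟨c', hc', Relation.ReflTransGen.head ⟨h2, ⟨es, h1, h3⟩, pvInS_key h4⟩ hrtg⟩
  have h40 : ∀ x ∈ seeds, pvPathFrom its target x (d.keys.length + 1 - (its.length + 1)) := by
    intro x hx
    refine ⟨fun _ => x, rfl, ?_, fun _ _ => hseedInS x hx⟩
    intro i hi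
    rw [hNits] at hi
    omega
  obtain ⟨hAnd, hAmem⟩ := pvLoopA_spec d target hP hnd (its.length + 1) seeds []
    hseedInS (by simp) (fun s hs => h30 s hs) h40 (by simp)
  -- B side
  obtain ⟨hB2, hB1⟩ := pvBuild_aux target its (PySem.Dict.empty, [])
  have hBseeds : (pvBuild target its).2 = seeds := by
    show (List.foldl (pvBStep target) (PySem.Dict.empty, []) its).2 = seeds
    rw [hB2, hseeds]
    simp only [List.nil_append]
  have hrevChar : ∀ c x, x ∈ (pvBuild target its).1.getD c [] ↔
      (x ≠ target ∧ ∃ es, (x, es) ∈ its ∧ c ∈ es) := by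
    intro c x
    unfold pvBuild
    rw [hB1 c x]
    simp
  have hrevK : ∀ c p, p ∈ (pvBuild target its).1.getD c [] → p ∈ its.map (fun kv => kv.1) := by
    intro c p hp
    obtain ⟨_, es, hmem, _⟩ := (hrevChar c p).1 hp
    exact List.mem_map.2 ⟨(p, es), hmem, rfl⟩
  have hrevS : ∀ c p, pvInS its target c → p ∈ (pvBuild target its).1.getD c [] →
      pvInS its target p := by
    intro c p hc hp
    obtain ⟨hne, es, hmem, hces⟩ := (hrevChar c p).1 hp
    exact pvInS.step p es c hmem hne hces hc
  have hfuel0 : (pvBuild target its).2.reverse.length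
      + ((its.map (fun kv => kv.1)).toFinset \ (PySem.Set.ofList (pvBuild target its).2).toFinset).card
      < (pvBuild target its).2.length + its.length + 1 := by
    have h1 : ((its.map (fun kv => kv.1)).toFinset \ (PySem.Set.ofList (pvBuild target its).2).toFinset).card
        ≤ (its.map (fun kv => kv.1)).toFinset.card := Finset.card_le_card (Finset.sdiff_subset)
    have h2 : (its.map (fun kv => kv.1)).toFinset.card ≤ (its.map (fun kv => kv.1)).length :=
      List.toFinset_card_le _
    have h3 : (its.map (fun kv => kv.1)).length = its.length := List.length_map ..
    simp only [List.length_reverse]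
    omega
  have hsv0 : ∀ c ∈ (pvBuild target its).2.reverse, c ∈ PySem.Set.ofList (pvBuild target its).2 := by
    intro c hc
    exact (PySem.Set.mem_ofList _ c).2 (List.mem_reverse.1 hc)
  have hvS0 : ∀ x ∈ PySem.Set.ofList (pvBuild target its).2, pvInS its target x := by
    intro x hx
    have := (PySem.Set.mem_ofList _ x).1 hx
    rw [hBseeds] at this
    exact hseedInS x this
  have hJ0 : ∀ x ∈ PySem.Set.ofList (pvBuild target its).2,
      x ∉ (pvBuild target its).2.reverse →
      ∀ p ∈ (pvBuild target its).1.getD x [], p ∈ PySem.Set.ofList (pvBuild target its).2 := by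
    intro x hx hxs
    exact absurd (List.mem_reverse.2 ((PySem.Set.mem_ofList _ x).1 hx)) hxs
  obtain ⟨hBnd, hBsup, hBS, hBcl⟩ := pvDfs_spec (pvBuild target its).1 its target hrevK hrevS
    ((pvBuild target its).2.length + its.length + 1)
    (pvBuild target its).2.reverse (PySem.Set.ofList (pvBuild target its).2)
    hfuel0 hsv0 (PySem.Set.nodup_ofList _) hvS0 hJ0
  set visB := pvDfs (pvBuild target its).1 ((pvBuild target its).2.length + its.length + 1)
    (pvBuild target its).2.reverse (PySem.Set.ofList (pvBuild target its).2) with hvisB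
  have hBmem : ∀ x, x ∈ visB ↔ pvInS its target x := by
    intro x
    refine ⟨fun hx => hBS x hx, fun hx => ?_⟩
    induction hx with
    | seed c es h1 h2 =>
        refine hBsup c ?_
        rw [PySem.Set.mem_ofList, hBseeds]
        exact mem_pvSeeds.2 ⟨es, h1, h2⟩
    | step p es c h1 h2 h3 h4 ih =>
        exact hBcl c ih p ((hrevChar c p).2 ⟨h2, es, h1, h3⟩)
  -- assemble
  have hperm : (pvLoopA its target (its.length + 1) seeds []).Perm visB :=
    (List.perm_ext_iff_of_nodup hAnd hBnd).2 (fun a => (hAmem a).trans (hBmem a).symm)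
  have hA : colors_containing target colors
      = ((pvLoopA its target (its.length + 1) seeds []).length : Int) := rfl
  have hB : colors_containing_alt target colors = ((visB).length : Int) := rfl
  rw [hA, hB]
  exact_mod_cast hperm.length_eq
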